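-- pv_equiv track=rewrite | github.com/Asher-1/pythonGames | CreateApplications/pygame下载/Alchemic Archer Source/ThiSisa_Reader.py | format_tiles
-- ===== SOURCE A (Python) =====
-- def format_tiles(MapData,chunksize=200):
--     TileChunks = {}
--     for Tile in MapData:
--         if Tile != []:
--             ChunkX = int(Tile[2]/chunksize)
--             ChunkY = int(Tile[3]/chunksize)
--             if str(ChunkX) + ',' + str(ChunkY) not in TileChunks:
--                 TileChunks[str(ChunkX) + ',' + str(ChunkY)] = []
--             TileChunks[str(ChunkX) + ',' + str(ChunkY)].append(Tile[:])
--     return TileChunks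
-- ===== SOURCE B (Python) =====
-- def format_tiles(MapData, chunksize=200):
--     def key(Tile):
--         return str(int(Tile[2] / chunksize)) + ',' + str(int(Tile[3] / chunksize))
--     tiles = [Tile for Tile in MapData if Tile != []]
--     return {k: [Tile[:] for Tile in tiles if key(Tile) == k]
--             for k in dict.fromkeys(map(key, tiles))}
-- ===== Notes on version B (the rewrite author's own statement) =====
-- stated objective: alternative
-- what changed: Replaces A's single-pass dict mutation (membership test, insert-empty, append) by a declarative two-phase grouping: filter out empty tiles once, compute the distinct chunk keys in first-appearance order via dict.fromkeys, then build the result as a dict comprehension that gathers each key's tiles with a per-key scan.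
import Mathlib
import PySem

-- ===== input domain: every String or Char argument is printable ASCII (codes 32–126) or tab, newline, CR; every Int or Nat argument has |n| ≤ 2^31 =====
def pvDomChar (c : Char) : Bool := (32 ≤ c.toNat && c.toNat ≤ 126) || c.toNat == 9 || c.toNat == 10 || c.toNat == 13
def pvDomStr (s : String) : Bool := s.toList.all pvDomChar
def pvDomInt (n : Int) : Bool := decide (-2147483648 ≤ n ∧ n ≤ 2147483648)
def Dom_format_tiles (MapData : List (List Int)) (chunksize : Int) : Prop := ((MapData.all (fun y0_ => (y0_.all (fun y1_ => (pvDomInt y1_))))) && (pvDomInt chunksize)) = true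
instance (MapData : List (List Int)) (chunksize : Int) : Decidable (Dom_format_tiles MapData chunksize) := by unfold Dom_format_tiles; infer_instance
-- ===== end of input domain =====

-- B rebuilds the grouping declaratively (filter, distinct keys in first-appearance order, a
-- per-key gathering scan) instead of A's single-pass dict mutation; objective: alternative.

-- ===== PORT A =====
-- str(ChunkX) + ',' + str(ChunkY) for a tile; Python's int(Tile[i]/chunksize) is float division
-- truncated toward zero — exact as Int.tdiv on Dom (|values| ≤ 2^31 < 2^52, so the correctly
-- rounded float quotient truncates to the exact truncated quotient); both Pythons compute it
-- with this very expression.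
def pvChunkKey (chunksize : Int) (Tile : List Int) : String :=
  PySem.Int.toStr (Int.tdiv (PySem.List.pyGetD Tile 2 0) chunksize) ++ ","
    ++ PySem.Int.toStr (Int.tdiv (PySem.List.pyGetD Tile 3 0) chunksize)

def format_tiles (MapData : List (List Int)) (chunksize : Int) : List (String × List (List Int)) :=
  (MapData.foldl (fun TileChunks Tile =>
      if Tile ≠ [] then
        let key := pvChunkKey chunksize Tile
        -- 'if key not in TileChunks: TileChunks[key] = []'
        let TileChunks := if TileChunks.contains key = false then TileChunks.insert key [] else TileChunks
        -- 'TileChunks[key].append(Tile[:])' (key is present here, so the modify default [] is never used)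
        TileChunks.modify key [] (fun v => v ++ [PySem.List.slice Tile none none])
      else TileChunks)
    PySem.Dict.empty).items

-- ===== PORT B =====
def format_tiles_alt (MapData : List (List Int)) (chunksize : Int) : List (String × List (List Int)) :=
  let tiles := MapData.filter (fun Tile => Tile ≠ [])
  -- dict.fromkeys(map(key, tiles)): the distinct keys in first-appearance order
  (PySem.Set.ofList (tiles.map (pvChunkKey chunksize))).map
    (fun k => (k, (tiles.filter (fun Tile => pvChunkKey chunksize Tile == k)).map
      (fun Tile => PySem.List.slice Tile none none)))

-- ===== PRECONDITION & SPEC =====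
-- A raises IndexError when a non-empty tile has fewer than 4 entries, and ZeroDivisionError
-- when chunksize = 0 and some non-empty tile exists; exactly those inputs are excluded
-- (B raises there too).
def Pre_format_tiles (MapData : List (List Int)) (chunksize : Int) : Prop :=
  (∀ Tile ∈ MapData, Tile ≠ [] → 4 ≤ Tile.length) ∧
    ((∃ Tile ∈ MapData, Tile ≠ []) → chunksize ≠ 0)
instance (MapData : List (List Int)) (chunksize : Int) : Decidable (Pre_format_tiles MapData chunksize) := by unfold Pre_format_tiles; infer_instance
def pvWitness_format_tiles : List (List Int) × Int := ([[1, 2, 350, 120, 9], [], [0, 0, -350, 120]], 200)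

def Spec_format_tiles (MapData : List (List Int)) (chunksize : Int) (out : List (String × List (List Int))) : Prop := out = format_tiles_alt MapData chunksize
instance (MapData : List (List Int)) (chunksize : Int) (out : List (String × List (List Int))) : Decidable (Spec_format_tiles MapData chunksize out) := by unfold Spec_format_tiles; infer_instance

-- ===== CLAIM (what is proved, stated in full; the proofs are below) =====
def Claim_equal_format_tiles : Prop := ∀ (MapData : List (List Int)) (chunksize : Int), Dom_format_tiles MapData chunksize → Pre_format_tiles MapData chunksize → Spec_format_tiles MapData chunksize (format_tiles MapData chunksize)

-- ===== LEMMAS AND PROOFS =====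

-- A's loop body acts only on non-empty tiles: the fold equals a fold over the filtered list.
theorem pv_foldl_if_filter {α β : Type} (step : β → α → β) (p : α → Prop) [DecidablePred p]
    (l : List α) (d : β) :
    l.foldl (fun d t => if p t then step d t else d) d
      = (l.filter (fun t => p t)).foldl step d := by
  induction l generalizing d with
  | nil => rfl
  | cons x xs ih =>
    by_cases hx : p x <;> simp [hx, ih]

-- 'insert empty if missing, then append' collapses to a single modify-with-default-[].
theorem pv_setdefault_modify (d : PySem.Dict String (List (List Int))) (k : String)
    (x : List Int) :
    (if d.contains k = false then d.insert k [] else d).modify k [] (fun v => v ++ [x])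
      = d.modify k [] (fun v => v ++ [x]) := by
  by_cases h : d.contains k = false
  · simp only [h, if_pos, PySem.Dict.modify, PySem.Dict.getD_insert_self,
      PySem.Dict.insert_insert_self, List.nil_append]
    simp [PySem.Dict.getD_of_not_contains, h]
  · simp [h]

theorem format_tiles_eq_aux (MapData : List (List Int)) (chunksize : Int) :
    format_tiles MapData chunksize = format_tiles_alt MapData chunksize := by
  unfold format_tiles format_tiles_alt
  rw [pv_foldl_if_filter]
  simp only [pv_setdefault_modify]
  -- turn the fold over tiles into a fold over (key, slice-copy) pairs
  have hfold :
      (MapData.filter (fun t => t ≠ [])).foldl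
        (fun d t => d.modify (pvChunkKey chunksize t) [] (fun v => v ++ [PySem.List.slice t none none]))
        PySem.Dict.empty
      = ((MapData.filter (fun t => t ≠ [])).map
          (fun t => (pvChunkKey chunksize t, PySem.List.slice t none none))).foldl
        (fun d p => d.modify p.1 [] (fun v => v ++ [p.2])) PySem.Dict.empty := by
    rw [List.foldl_map]
  rw [hfold]
  set tiles := MapData.filter (fun t => t ≠ []) with htiles
  set pairs := tiles.map (fun t => (pvChunkKey chunksize t, PySem.List.slice t none none)) with hpairs
  have hnodup : (pairs.foldl (fun d p => d.modify p.1 [] (fun v => v ++ [p.2])) PySem.Dict.empty).keys.Nodup := by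
    have := PySem.Dict.nodup_keys_foldl_modify_key pairs (fun p => p.1) []
      (fun d p => (fun v => v ++ [p.2])) PySem.Dict.empty (by simp)
    exact this
  rw [PySem.Dict.items_eq_map_keys _ hnodup []]
  have hkeys :
      (pairs.foldl (fun d p => d.modify p.1 [] (fun v => v ++ [p.2])) PySem.Dict.empty).keys
        = PySem.Set.ofList (tiles.map (pvChunkKey chunksize)) := by
    have := PySem.Dict.keys_foldl_modify_key pairs (fun p => p.1) []
      (fun d p => (fun v => v ++ [p.2])) PySem.Dict.empty
    rw [this, PySem.Dict.keys_empty, PySem.Set.update_nil_left, hpairs, List.map_map]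
    rfl
  rw [hkeys]
  apply List.map_congr_left
  intro k _
  refine Prod.ext rfl ?_
  show (pairs.foldl (fun d p => d.modify p.1 [] (fun v => v ++ [p.2])) PySem.Dict.empty).getD k [] = _
  rw [PySem.Dict.getD_foldl_modify_append, PySem.Dict.getD_empty, List.nil_append, hpairs,
    List.filter_map, List.map_map]
  rfl

-- ===== VERDICT (by name: the statement is the Claim_ definition above) =====
theorem format_tiles_spec : Claim_equal_format_tiles := by
  intro MapData chunksize _ _
  unfold Spec_format_tiles
  exact format_tiles_eq_aux MapData chunksize
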